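-- pv_equiv track=rewrite | github.com/SiuSte01/mv_utilities | timeAggr/timeAggr.py | convertToTab
-- ===== SOURCE A (Python) =====
-- def convertToTab(line):
-- 	#this code will take in a string of characters and parse through it and convert the appropriate commas to
-- 	#tabs and leave the literal commas alone
-- 	#it will return the fixed string for the code that calls this function to use
-- 	sep = '\t'
-- 	quoted = False
-- 	outList = []
-- 	for char in line:
-- 		if char == "\"":
-- 			quoted = not quoted
-- 		elif char == ",":
-- 			if quoted:
-- 				outList.append(char)
-- 			else:
-- 				outList.append(sep)
-- 		else:
-- 			outList.append(char)
-- 	return ''.join(outList)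
-- ===== SOURCE B (Python) =====
-- def convertToTab(line):
--     # Split on double quotes: even-index segments are unquoted (commas become
--     # tabs), odd-index segments are quoted (kept verbatim); the quotes
--     # themselves are dropped, exactly as the flag-toggling loop drops them.
--     return ''.join(seg if i % 2 else seg.replace(',', '\t')
--                    for i, seg in enumerate(line.split('"')))
-- ===== Notes on version B (the rewrite author's own statement) =====
-- stated objective: idiomatic
-- what changed: Replaced the character-by-character loop with a stateful quote flag by splitting on the double-quote character into segments, mapping even-index (unquoted) segments through str.replace of commas by tabs and joining; the parity of the segment index replaces the toggling flag.
import Mathlib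
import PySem

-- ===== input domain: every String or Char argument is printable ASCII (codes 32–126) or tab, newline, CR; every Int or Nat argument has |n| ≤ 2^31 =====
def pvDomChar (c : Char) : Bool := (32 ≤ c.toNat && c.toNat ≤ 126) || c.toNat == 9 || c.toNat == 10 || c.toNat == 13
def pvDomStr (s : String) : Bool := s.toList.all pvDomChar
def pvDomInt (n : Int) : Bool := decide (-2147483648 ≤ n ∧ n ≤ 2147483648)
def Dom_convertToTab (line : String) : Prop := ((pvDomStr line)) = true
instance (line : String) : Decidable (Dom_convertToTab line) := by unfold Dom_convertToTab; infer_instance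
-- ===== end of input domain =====

-- B replaces A's char loop with a quote flag by split('"') + even/odd segment mapping (idiomatic; return value only, no mutation).

-- ===== PORT A =====
-- the loop body: state is (quoted, outList)
def convertToTabStep (st : Bool × List Char) (c : Char) : Bool × List Char :=
  if c = '"' then (!st.1, st.2)
  else if c = ',' then
    (st.1, st.2 ++ [if st.1 then ',' else '\t'])
  else (st.1, st.2 ++ [c])

def convertToTab (line : String) : String :=
  String.mk ((line.toList.foldl convertToTabStep (false, [])).2)

-- ===== PORT B =====
-- following Source B: split on '"', replace ',' by '\t' in even-index segments, join
def convertToTab_alt (line : String) : String :=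
  String.mk (PySem.Chars.join []
    ((PySem.List.enumerate (PySem.Chars.splitOn line.toList ['"']) 0).map
      (fun p => if PySem.Int.mod p.1 2 = 0
                then PySem.Chars.replace p.2 [','] ['\t']
                else p.2)))

-- ===== PRECONDITION & SPEC =====
def Spec_convertToTab (line : String) (out : String) : Prop := out = convertToTab_alt line
instance (line : String) (out : String) : Decidable (Spec_convertToTab line out) := by unfold Spec_convertToTab; infer_instance

-- ===== CLAIM (what is proved, stated in full; the proofs are below) =====
def Claim_equal_convertToTab : Prop := ∀ (line : String), Dom_convertToTab line → Spec_convertToTab line (convertToTab line)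

-- ===== LEMMAS AND PROOFS =====

-- single-character replacement performed by replace(',', '\t') on any segment
def pvRepl (c : Char) : Char := if c = ',' then '\t' else c

-- reference recursion: what A's flag loop emits from state q
def pvF (q : Bool) : List Char → List Char
  | [] => []
  | c :: cs =>
    if c = '"' then pvF (!q) cs
    else (if c = ',' then (if q then ',' else '\t') else c) :: pvF q cs

-- reference split on '"' with the current segment as accumulator
def pvSp (pre : List Char) : List Char → List (List Char)
  | [] => [pre]
  | c :: l => if c = '"' then pre :: pvSp [] l else pvSp (pre ++ [c]) l

-- alternate processing of segments: q = true means "quoted segment, keep"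
def pvAlt (q : Bool) : List (List Char) → List Char
  | [] => []
  | s :: rest => (if q then s else s.map pvRepl) ++ pvAlt (!q) rest

theorem pvFoldA (cs : List Char) : ∀ (q : Bool) (acc : List Char),
    (cs.foldl convertToTabStep (q, acc)).2 = acc ++ pvF q cs := by
  induction cs with
  | nil => intro q acc; simp [pvF]
  | cons c cs ih =>
    intro q acc
    by_cases h1 : c = '"'
    · simp [convertToTabStep, h1, pvF, ih]
    · by_cases h2 : c = ','
      · simp [convertToTabStep, h1, h2, pvF, ih]
      · simp [convertToTabStep, h1, h2, pvF, ih]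

theorem pvReplaceGo (fuel : Nat) : ∀ (l acc : List Char), l.length ≤ fuel →
    PySem.Chars.replace.go [','] ['\t'] fuel l acc = acc.reverse ++ l.map pvRepl := by
  induction fuel with
  | zero => intro l acc h; simp at h; simp [h, PySem.Chars.replace.go]
  | succ n ih =>
    intro l acc h
    cases l with
    | nil => simp [PySem.Chars.replace.go]
    | cons c t =>
      simp only [List.length_cons] at h
      by_cases hc : c = ','
      · have : List.isPrefixOf [','] (c :: t) = true := by simp [hc, List.isPrefixOf]
        simp [PySem.Chars.replace.go, this, ih t _ (by omega), hc, pvRepl]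
      · have hp : List.isPrefixOf [','] (c :: t) = false := by
          simp [List.isPrefixOf]; exact fun h => hc h.symm
        simp [PySem.Chars.replace.go, hp, hc, ih t _ (by omega), pvRepl]

theorem pvReplaceEq (l : List Char) :
    PySem.Chars.replace l [','] ['\t'] = l.map pvRepl := by
  simp [PySem.Chars.replace, pvReplaceGo l.length l [] le_rfl]

theorem pvSplitGo (fuel : Nat) : ∀ (l cur : List Char) (acc : List (List Char)),
    l.length < fuel →
    PySem.Chars.splitOn.go ['"'] fuel l cur acc = acc.reverse ++ pvSp cur.reverse l := by
  induction fuel with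
  | zero => intro l cur acc h; omega
  | succ n ih =>
    intro l cur acc h
    cases l with
    | nil => simp [PySem.Chars.splitOn.go, pvSp]
    | cons c t =>
      simp only [List.length_cons] at h
      by_cases hc : c = '"'
      · have hp : List.isPrefixOf ['"'] (c :: t) = true := by simp [hc, List.isPrefixOf]
        simp [PySem.Chars.splitOn.go, hp, hc, pvSp, ih t [] _ (by omega)]
      · have hp : List.isPrefixOf ['"'] (c :: t) = false := by
          simp [List.isPrefixOf]; exact fun h => hc h.symm
        simp [PySem.Chars.splitOn.go, hp, hc, pvSp, ih t (c :: cur) acc (by omega)]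

theorem pvSplitEq (l : List Char) :
    PySem.Chars.splitOn l ['"'] = pvSp [] l := by
  have := pvSplitGo (l.length + 1) l [] [] (by omega)
  simpa [PySem.Chars.splitOn] using this

theorem pvJoinNil (xs : List (List Char)) :
    PySem.Chars.join [] xs = xs.flatten := by
  induction xs with
  | nil => simp [PySem.Chars.join, List.intercalate]
  | cons x t ih =>
    cases t with
    | nil => simp [PySem.Chars.join, List.intercalate]
    | cons y u =>
      simp [PySem.Chars.join, List.intercalate] at ih ⊢
      simpa using ih

theorem pvEnum (segs : List (List Char)) : ∀ (k : Nat),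
    ((PySem.List.enumerate segs (k : Int)).map
      (fun p => if PySem.Int.mod p.1 2 = 0
                then PySem.Chars.replace p.2 [','] ['\t'] else p.2)).flatten
      = pvAlt (decide (k % 2 = 1)) segs := by
  induction segs with
  | nil => intro k; simp [PySem.List.enumerate_nil, pvAlt]
  | cons s rest ih =>
    intro k
    rw [PySem.List.enumerate_cons]
    have hk1 : ((k : Int) + 1) = ((k + 1 : Nat) : Int) := by push_cast; ring
    have hmod : PySem.Int.mod (k : Int) 2 = ((k % 2 : Nat) : Int) := by
      rw [PySem.Int.mod, Int.fmod_eq_emod]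
      have h2 : (0:Int) ≤ 2 ∨ (2:Int) ∣ (k:Int) := Or.inl (by norm_num)
      rw [if_pos h2]
      omega
    rw [List.map_cons, List.flatten_cons, hk1, ih (k + 1)]
    rcases Nat.mod_two_eq_zero_or_one k with h | h
    · have h' : (k + 1) % 2 = 1 := by omega
      simp [hmod, h, h', pvAlt, pvReplaceEq]
      intro hx; exfalso; omega
    · have h' : (k + 1) % 2 = 0 := by omega
      simp [hmod, h, h', pvAlt]
      intro hx; exfalso; omega

theorem pvMain (l : List Char) : ∀ (pre : List Char) (q : Bool),
    pvAlt q (pvSp pre l) = (if q then pre else pre.map pvRepl) ++ pvF q l := by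
  induction l with
  | nil => intro pre q; simp [pvSp, pvAlt, pvF]
  | cons c t ih =>
    intro pre q
    by_cases hc : c = '"'
    · simp [pvSp, hc, pvAlt, pvF, ih []]
    · by_cases h2 : c = ','
      · simp [pvSp, hc, pvF, h2, ih (pre ++ [',']), pvRepl]
        cases q <;> simp [pvRepl]
      · simp [pvSp, hc, pvF, h2, ih (pre ++ [c]), pvRepl]
        cases q <;> simp [pvRepl, h2]

-- ===== VERDICT (by name: the statement is the Claim_ definition above) =====
theorem convertToTab_spec : Claim_equal_convertToTab := by
  intro line _
  unfold Spec_convertToTab convertToTab convertToTab_alt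
  rw [pvJoinNil, pvSplitEq]
  have e := pvEnum (pvSp [] line.toList) 0
  simp only [Nat.cast_zero] at e
  rw [e]
  norm_num at e ⊢
  simp [pvMain line.toList [] false, pvFoldA line.toList false []]
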